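-- pv_equiv track=rewrite | github.com/VahagnSyan/Python | Homeworks_14_to_16/task_14.py | count_of_letters
-- ===== SOURCE A (Python) =====
-- def count_of_letters(sentence):
--     marks = "\\!()-[]}{;:',<>./?@#$%^&*_~'\"|"
--
--     for symbool in sentence:
--         if symbool in marks:
--             sentence = sentence.replace(symbool, " ")
--     sentence_to_list = sentence.split()
--     result = dict()
--     for i in sentence:
--         result[i] = result.get(i,0) + 1
--     return result
-- ===== SOURCE B (Python) =====
-- def count_of_letters(sentence):
--     marks = "\\!()-[]}{;:',<>./?@#$%^&*_~'\"|"
--     cleaned = sentence.translate(str.maketrans(marks, " " * len(marks)))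
--
--     def tally(chars):
--         if not chars:
--             return {}
--         head = chars[0]
--         rest = [c for c in chars if c != head]
--         counts = {head: len(chars) - len(rest)}
--         counts.update(tally(rest))
--         return counts
--
--     return tally(list(cleaned))
-- ===== Notes on version B (the rewrite author's own statement) =====
-- stated objective: alternative
-- what changed: Cleans via a translation table (str.translate) instead of repeated str.replace passes, and counts by a recursive partition: take the first remaining character, count it by removing all its occurrences, and recurse on the shrunken list, instead of A's single accumulating dict pass.
import Mathlib
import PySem

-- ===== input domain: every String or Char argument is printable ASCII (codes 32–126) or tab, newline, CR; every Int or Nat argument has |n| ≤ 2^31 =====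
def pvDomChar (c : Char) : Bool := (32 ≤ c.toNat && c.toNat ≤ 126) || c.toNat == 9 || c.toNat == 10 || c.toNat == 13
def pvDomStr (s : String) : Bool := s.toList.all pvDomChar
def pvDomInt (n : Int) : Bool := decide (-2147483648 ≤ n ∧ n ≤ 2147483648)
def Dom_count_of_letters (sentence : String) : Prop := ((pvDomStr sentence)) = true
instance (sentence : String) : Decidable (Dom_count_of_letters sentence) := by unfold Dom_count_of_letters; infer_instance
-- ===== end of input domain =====

-- B cleans through a translation table (str.translate) instead of A's repeated str.replace
-- passes, and counts by a recursive partition (count-and-remove the first remaining character,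
-- recurse on the rest) instead of A's accumulating dict pass (objective: alternative).

-- ===== PORT A =====
def count_of_letters (sentence : String) : List (String × Int) :=
  let marks : String := "\\!()-[]}{;:',<>./?@#$%^&*_~'\"|"
  -- 'for symbool in sentence:' iterates the ORIGINAL string; 'sentence' is reassigned inside the loop
  let sentence1 : String := sentence.toList.foldl
    (fun (s : String) symbool =>
      if PySem.Str.isIn (String.ofList [symbool]) marks then PySem.Str.replace s (String.ofList [symbool]) " " else s)
    sentence
  let _sentence_to_list := PySem.Str.split₀ sentence1   -- computed and discarded, as in A
  (sentence1.toList.foldl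
    (fun (result : PySem.Dict String Int) i =>
      result.insert (String.ofList [i]) (result.getD (String.ofList [i]) 0 + 1))
    PySem.Dict.empty).items

-- ===== PORT B =====
-- tally: head character, its count by removal, recurse on the shrunken list
def pvTally : List Char → List (String × Int)
  | [] => []
  | h :: t =>
    let rest := (h :: t).filter (fun c => !(c == h))
    (String.ofList [h], ((h :: t).length : Int) - (rest.length : Int)) :: pvTally rest
  termination_by l => l.length
  decreasing_by
    simp only [List.filter_cons, beq_self_eq_true, Bool.not_true, List.length_cons,
      if_neg (by simp : ¬ (false = true))]
    have := List.length_filter_le (fun c => !(c == h)) t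
    omega

def count_of_letters_alt (sentence : String) : List (String × Int) :=
  let marks : String := "\\!()-[]}{;:',<>./?@#$%^&*_~'\"|"
  -- str.maketrans(marks, " "*len(marks)): each mark character maps to a space
  let table : PySem.Dict Char Char :=
    marks.toList.foldl (fun d m => d.insert m ' ') PySem.Dict.empty
  -- str.translate: map each character through the table, identity when absent
  let cleaned : List Char := sentence.toList.map (fun c => (table.get? c).getD c)
  pvTally cleaned

-- ===== PRECONDITION & SPEC =====
def Spec_count_of_letters (sentence : String) (out : List (String × Int)) : Prop := out = count_of_letters_alt sentence
instance (sentence : String) (out : List (String × Int)) : Decidable (Spec_count_of_letters sentence out) := by unfold Spec_count_of_letters; infer_instance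

-- ===== CLAIM (what is proved, stated in full; the proofs are below) =====
def Claim_equal_count_of_letters : Prop := ∀ (sentence : String), Dom_count_of_letters sentence → Spec_count_of_letters sentence (count_of_letters sentence)

-- ===== LEMMAS AND PROOFS =====

-- replacing a single-char needle by a single-char space is a character map
theorem replace_go_single (x : Char) (l : List Char) (acc : List Char) (fuel : Nat)
    (h : l.length ≤ fuel) :
    PySem.Chars.replace.go [x] [' '] fuel l acc
      = acc.reverse ++ l.map (fun c => if c = x then ' ' else c) := by
  induction l generalizing fuel acc with
  | nil => cases fuel <;> simp [PySem.Chars.replace.go]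
  | cons c t ih =>
    cases fuel with
    | zero => simp at h
    | succ f =>
      rw [PySem.Chars.replace.go]
      by_cases hcx : x = c
      · subst hcx
        simp [List.isPrefixOf, ih _ _ (by simpa using h)]
      · simp [List.isPrefixOf, Ne.symm hcx, hcx, ih _ _ (by simpa using h)]

theorem replace_single (x : Char) (s : String) :
    (PySem.Str.replace s (String.ofList [x]) " ").toList
      = s.toList.map (fun c => if c = x then ' ' else c) := by
  rw [PySem.Str.toList_replace]
  simp only [String.toList_ofList]
  show PySem.Chars.replace s.toList [x] [' '] = _
  rw [PySem.Chars.replace]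
  rw [if_neg (by simp)]
  rw [replace_go_single x s.toList [] s.toList.length le_rfl]
  rfl

-- single-character membership test = list membership
theorem isIn_single (c : Char) (m : String) :
    PySem.Str.isIn (String.ofList [c]) m = m.toList.contains c := by
  by_cases h : c ∈ m.toList
  · have ht : [c] <:+: m.toList := by
      obtain ⟨s, t, hst⟩ := List.append_of_mem h
      exact ⟨s, t, by rw [hst]; simp⟩
    have h1 : PySem.Str.isIn (String.ofList [c]) m = true :=
      (PySem.Str.isIn_iff_infix _ _).mpr (by rw [String.toList_ofList]; exact ht)
    rw [h1]; symm; simpa using h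
  · have h1 : PySem.Str.isIn (String.ofList [c]) m = false := by
      rw [Bool.eq_false_iff]
      intro htr
      have hinf := (PySem.Str.isIn_iff_infix _ _).mp htr
      rw [String.toList_ofList] at hinf
      exact h (hinf.subset (List.mem_singleton.mpr rfl))
    rw [h1]; symm; simpa using h

-- A's replace loop, at the character level
def pvStep (marks : String) (S : List Char) (x : Char) : List Char :=
  if PySem.Str.isIn (String.ofList [x]) marks then S.map (fun c => if c = x then ' ' else c) else S

theorem fold_string_to_chars (marks : String) (todo : List Char) (s : String) :
    (todo.foldl
      (fun (s : String) symbool =>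
        if PySem.Str.isIn (String.ofList [symbool]) marks then PySem.Str.replace s (String.ofList [symbool]) " " else s)
      s).toList
      = todo.foldl (pvStep marks) s.toList := by
  induction todo generalizing s with
  | nil => rfl
  | cons x t ih =>
    simp only [List.foldl_cons]
    rw [ih]
    congr 1
    unfold pvStep
    by_cases h : PySem.Str.isIn (String.ofList [x]) marks = true
    · rw [if_pos h, if_pos h, replace_single]
    · rw [if_neg h, if_neg h]

-- invariant of the replace loop: every mark character seen so far has become a space
theorem fold_clean (marks : String) (todo : List Char) (cur : List Char) :
    todo.foldl (pvStep marks) cur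
      = cur.map (fun c => if PySem.Str.isIn (String.ofList [c]) marks = true ∧ c ∈ todo then ' ' else c) := by
  induction todo generalizing cur with
  | nil => simp
  | cons x t ih =>
    simp only [List.foldl_cons]
    rw [ih]
    unfold pvStep
    simp only [PySem.Str.isIn, String.toList_ofList]
    by_cases hx : PySem.Chars.isIn [x] marks.toList = true
    · rw [if_pos hx, List.map_map]
      apply List.map_congr_left
      intro c _
      by_cases hcx : c = x
      · subst hcx; simp [hx]
      · simp [Function.comp, hcx]
    · rw [if_neg hx]
      apply List.map_congr_left
      intro c _
      by_cases hcx : c = x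
      · subst hcx; simp [hx]
      · simp [hcx]

theorem ofListChar_injective : Function.Injective (fun c : Char => String.ofList [c]) := by
  intro a b h
  simpa using congrArg String.toList h

theorem contains_map_ofListChar (s : List Char) (x : Char) :
    PySem.Set.contains (s.map (fun c => String.ofList [c])) (String.ofList [x])
      = PySem.Set.contains s x := by
  induction s with
  | nil => rfl
  | cons a t ih =>
    simp only [List.map_cons]
    show ((a :: t).map (fun c => String.ofList [c])).contains (String.ofList [x]) = (a :: t).contains x
    by_cases h : x = a
    · subst h; simp
    · simp only [List.map_cons, List.contains_cons]
      have h1 : (String.ofList [x] == String.ofList [a]) = false := by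
        simp
        intro hmk
        exact h (ofListChar_injective hmk)
      have h2 : (x == a) = false := by simp [h]
      rw [h1, h2]
      simpa using ih

theorem foldl_add_map_ofListChar (l : List Char) (s : List Char) :
    (l.map (fun c => String.ofList [c])).foldl PySem.Set.add (s.map (fun c => String.ofList [c]))
      = (l.foldl PySem.Set.add s).map (fun c => String.ofList [c]) := by
  induction l generalizing s with
  | nil => rfl
  | cons x t ih =>
    simp only [List.map_cons, List.foldl_cons]
    have : PySem.Set.add (s.map (fun c => String.ofList [c])) (String.ofList [x])
        = (PySem.Set.add s x).map (fun c => String.ofList [c]) := by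
      unfold PySem.Set.add
      rw [contains_map_ofListChar]
      by_cases h : PySem.Set.contains s x = true
      · rw [if_pos h, if_pos h]
      · rw [if_neg h, if_neg h]; simp
    rw [this, ih]

theorem ofList_map_ofListChar (l : List Char) :
    PySem.Set.ofList (l.map (fun c => String.ofList [c]))
      = (PySem.Set.ofList l).map (fun c => String.ofList [c]) := by
  rw [PySem.Set.ofList_eq_foldl, PySem.Set.ofList_eq_foldl]
  have := foldl_add_map_ofListChar l []
  simpa using this

-- B's translation table: lookup = membership in marks, constant value ' '
theorem table_get? (ms : List Char) (d : PySem.Dict Char Char) (c : Char) :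
    (ms.foldl (fun d m => d.insert m ' ') d).get? c
      = if ms.contains c then some ' ' else d.get? c := by
  induction ms generalizing d with
  | nil => simp
  | cons m t ih =>
    simp only [List.foldl_cons, List.contains_cons]
    rw [ih, PySem.Dict.get?_insert]
    by_cases hm : c = m
    · subst hm; simp
    · by_cases hc : t.contains c = true <;> simp [hm]

-- de-duplication peels off the head: distinct elements of h::t are h then the distinct
-- elements of t with h removed
theorem foldl_add_skip (h : Char) (t : List Char) (s : List Char) (hs : h ∈ s) :
    t.foldl PySem.Set.add s = (t.filter (fun c => !(c == h))).foldl PySem.Set.add s := by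
  induction t generalizing s with
  | nil => rfl
  | cons x r ih =>
    simp only [List.filter_cons]
    by_cases hx : x = h
    · subst hx
      simp only [beq_self_eq_true, Bool.not_true, if_neg (by simp : ¬ (false = true))]
      have : PySem.Set.add s x = s := by
        unfold PySem.Set.add
        rw [if_pos (by simpa [PySem.Set.contains] using hs)]
      rw [List.foldl_cons, this, ih s hs]
    · have : (!(x == h)) = true := by simp [hx]
      rw [this, if_pos rfl, List.foldl_cons, List.foldl_cons]
      apply ih
      unfold PySem.Set.add
      split
      · exact hs
      · exact List.mem_append_left _ hs

theorem foldl_add_cons_notmem (h : Char) (l : List Char) (s : List Char) (hl : h ∉ l) :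
    l.foldl PySem.Set.add (h :: s) = h :: l.foldl PySem.Set.add s := by
  induction l generalizing s with
  | nil => rfl
  | cons x r ih =>
    have hxh : x ≠ h := fun e => hl (e ▸ List.mem_cons_self ..)
    simp only [List.foldl_cons]
    have hstep : PySem.Set.add (h :: s) x = h :: (PySem.Set.add s x) := by
      unfold PySem.Set.add PySem.Set.contains
      have hcc : (h :: s).contains x = s.contains x := by
        simp [hxh]
      rw [hcc]
      split
      · rfl
      · rfl
    rw [hstep, ih _ (fun hm => hl (List.mem_cons_of_mem _ hm))]

theorem ofList_cons_filter (h : Char) (t : List Char) :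
    PySem.Set.ofList (h :: t) = h :: PySem.Set.ofList (t.filter (fun c => !(c == h))) := by
  rw [PySem.Set.ofList_eq_foldl, PySem.Set.ofList_eq_foldl]
  simp only [List.foldl_cons]
  have h1 : PySem.Set.add [] h = [h] := rfl
  rw [h1, foldl_add_skip h t [h] (List.mem_singleton.mpr rfl)]
  have h2 : h ∉ t.filter (fun c => !(c == h)) := by
    intro hm
    have := List.of_mem_filter hm
    simp at this
  exact foldl_add_cons_notmem h (t.filter (fun c => !(c == h))) [] h2

-- B's recursive tally computes first-occurrence-ordered counts
theorem tally_eq (n : Nat) : ∀ (L : List Char), L.length ≤ n →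
    pvTally L = (PySem.Set.ofList L).map (fun c => (String.ofList [c], (L.count c : Int))) := by
  induction n with
  | zero =>
    intro L hL
    have : L = [] := List.eq_nil_of_length_eq_zero (Nat.le_zero.mp hL)
    subst this
    simp [pvTally]
  | succ n ih =>
    intro L hL
    match L with
    | [] => simp [pvTally]
    | h :: t =>
      rw [pvTally]
      have hfil : (h :: t).filter (fun c => !(c == h)) = t.filter (fun c => !(c == h)) := by
        simp
      have hlen : (t.filter (fun c => !(c == h))).length ≤ n := by
        have := List.length_filter_le (fun c => !(c == h)) t
        simp at hL
        omega
      rw [hfil, ih _ hlen, ofList_cons_filter]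
      simp only [List.map_cons]
      congr 1
      · -- head: length difference = count of h
        congr 1
        have hsplit : (h :: t).length
            = (h :: t).count h + ((h :: t).filter (fun c => !(c == h))).length := by
          rw [← List.countP_eq_length_filter]
          rw [List.count]
          have := List.length_eq_countP_add_countP (fun c => c == h) (l := h :: t)
          have hc : List.countP (fun c => ¬ (c == h) = true) (h :: t)
              = List.countP (fun c => !(c == h)) (h :: t) := by
            apply List.countP_congr
            intro a _
            simp
          omega
        rw [hfil] at hsplit
        omega
      · -- tail: counts in the filtered list equal counts in the whole list
        apply List.map_congr_left
        intro c hc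
        have hcmem : c ∈ t.filter (fun c => !(c == h)) := by
          simpa using (PySem.Set.mem_ofList ..).mp hc
        have hch : c ≠ h := by
          have := List.of_mem_filter hcmem
          simpa using this
        congr 1
        rw [List.count_filter (by simp [hch])]
        simp [Ne.symm hch]

-- ===== VERDICT (by name: the statement is the Claim_ definition above) =====
theorem count_of_letters_spec : Claim_equal_count_of_letters := by
  intro sentence _
  show count_of_letters sentence = count_of_letters_alt sentence
  simp only [count_of_letters, count_of_letters_alt]
  rw [fold_string_to_chars, fold_clean]
  set marks : String := "\\!()-[]}{;:',<>./?@#$%^&*_~'\"|" with hmarks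
  -- both cleaned strings are the same character list L
  have hfun : ∀ c ∈ sentence.toList,
      (if PySem.Str.isIn (String.ofList [c]) marks = true ∧ c ∈ sentence.toList then ' ' else c)
        = (((marks.toList.foldl (fun d m => d.insert m ' ') PySem.Dict.empty).get? c).getD c) := by
    intro c hc
    rw [table_get? marks.toList PySem.Dict.empty c]
    by_cases h : marks.toList.contains c = true
    · rw [if_pos h]
      rw [if_pos ⟨by rw [isIn_single]; exact h, hc⟩]
      rfl
    · rw [if_neg h]
      rw [if_neg (fun hh => h (by rw [← isIn_single]; exact hh.1))]
      simp [PySem.Dict.get?_empty]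
  rw [List.map_congr_left hfun]
  set L := sentence.toList.map
      (fun c => (((marks.toList.foldl (fun d m => d.insert m ' ') PySem.Dict.empty).get? c).getD c)) with hLdef
  -- A's counting loop is Counter over the single-char strings
  have hfold :
      List.foldl
        (fun (result : PySem.Dict String Int) i =>
          result.insert (String.ofList [i]) (result.getD (String.ofList [i]) 0 + 1))
        PySem.Dict.empty L
      = List.foldl (fun (d : PySem.Dict String Int) x => d.insert x (d.getD x 0 + 1))
          PySem.Dict.empty (L.map (fun c => String.ofList [c])) := by
    simp only [List.foldl_map]
  rw [hfold, PySem.Dict.foldl_insert_getD_add_one_eq_counter, PySem.Dict.items_counter]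
  rw [ofList_map_ofListChar, List.map_map]
  rw [tally_eq L.length L le_rfl]
  apply List.map_congr_left
  intro c _
  simp only [Function.comp]
  congr 1
  rw [List.count_map_of_injective L _ ofListChar_injective]
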